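-- pv_equiv track=rewrite | github.com/helloworld/python-fastapi-postgres-benchmark | app/main.py | search_function
-- ===== SOURCE A (Python) =====
-- def search_function(data, query):
--     huge_list = []
--     for i in range(len(data)):
--         for _ in range(3):
--             huge_list.append(data[i])
--
--     filtered_results_pass1 = []
--     for elem in huge_list:
--         found = False
--         for start_idx in range(len(elem)):
--             if len(elem) - start_idx >= len(query):
--                 match = True
--                 for offset in range(len(query)):
--                     if elem[start_idx + offset] != query[offset]:
--                         match = False
--                         break
--                 if match:
--                     found = True
--                     break
--         if found:
--             filtered_results_pass1.append(elem)
--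
--     ranked_results = []
--     for candidate in filtered_results_pass1:
--         occurrence_count = 0
--         for start_idx in range(len(candidate)):
--             if len(candidate) - start_idx >= len(query):
--                 match = True
--                 for offset in range(len(query)):
--                     if candidate[start_idx + offset] != query[offset]:
--                         match = False
--                         break
--                 if match:
--                     occurrence_count += 1
--         ranked_results.append((candidate, occurrence_count))
--
--     deduplicated_results = []
--     for i, (candidate, occ_count) in enumerate(ranked_results):
--         already_present = False
--         for dedup_cand, dedup_occ in deduplicated_results:
--             if candidate == dedup_cand:
--                 already_present = True
--                 break
--         if not already_present:
--             deduplicated_results.append((candidate, occ_count))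
--
--     for _ in range(len(deduplicated_results)):
--         for j in range(len(deduplicated_results) - 1):
--             if deduplicated_results[j][1] < deduplicated_results[j + 1][1]:
--                 temp = deduplicated_results[j]
--                 deduplicated_results[j] = deduplicated_results[j + 1]
--                 deduplicated_results[j + 1] = temp
--
--     final_results = []
--     for candidate, occ_count in deduplicated_results:
--         final_results.append(candidate)
--
--     return final_results
-- ===== SOURCE B (Python) =====
-- def search_function(data, query):
--     m = len(query)
--     counts = {}
--     for elem in data:
--         if elem not in counts:
--             c = 0
--             for i in range(len(elem) - m + 1):
--                 if elem[i:i+m] == query: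
--                     c += 1
--             if c > 0:
--                 counts[elem] = c
--     ranked = sorted(counts.items(), key=lambda kv: -kv[1])
--     return [elem for elem, _ in ranked]
-- ===== Notes on version B (the rewrite author's own statement) =====
-- stated objective: faster
-- what changed: B replaces A's triplicate-then-filter-then-rank-then-quadratic-dedup-then-bubble-sort pipeline with one pass over data using a dict for dedup (counting each distinct element once by slice comparison) followed by a single stable library sort by descending count.
-- intended difference: When query is '' and data contains '', A's hand-rolled matcher (which scans start positions 0..len(elem)-1) never matches the empty query against the empty string and silently drops it, while B, like Python's 'in'/slicing convention, treats every string as containing the empty substring and keeps it; B's is the intended behaviour. — e.g. on search_function(["ab", ""], ""): A returns ["ab"], B returns ["ab", ""]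
import Mathlib
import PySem

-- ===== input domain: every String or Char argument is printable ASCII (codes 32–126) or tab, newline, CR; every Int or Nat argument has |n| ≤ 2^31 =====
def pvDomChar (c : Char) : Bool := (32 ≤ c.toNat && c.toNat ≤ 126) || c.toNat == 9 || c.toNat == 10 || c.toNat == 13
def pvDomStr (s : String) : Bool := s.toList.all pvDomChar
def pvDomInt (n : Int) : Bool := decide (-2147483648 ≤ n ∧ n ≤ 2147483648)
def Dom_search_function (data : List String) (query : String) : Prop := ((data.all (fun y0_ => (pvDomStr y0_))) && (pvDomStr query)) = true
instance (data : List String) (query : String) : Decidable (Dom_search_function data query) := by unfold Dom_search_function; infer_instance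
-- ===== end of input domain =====

-- B replaces A's triplicate/filter/rank/quadratic-dedup/bubble-sort pipeline by one pass with a
-- dict for dedup (one slice-comparison count per distinct element) and a single stable sort by
-- descending count; measured faster on large inputs (asymptotics: dedup N^2→N, sort K^2→K log K).

-- ===== PORT A =====
def search_function (data : List String) (query : String) : List String :=
  let huge_list : List String :=
    (PySem.List.pyRange 0 (PySem.List.len data) 1).foldl
      (fun acc i =>
        (PySem.List.pyRange 0 3 1).foldl
          (fun acc2 _ => acc2 ++ [PySem.List.pyGetD data i ""]) acc) []
  let filtered_results_pass1 : List String :=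
    huge_list.foldl
      (fun acc elem =>
        let found : Bool :=
          (PySem.List.pyRange 0 (PySem.Str.len elem) 1).foldl
            (fun found start_idx =>
              if PySem.Str.len elem - start_idx ≥ PySem.Str.len query then
                let mtch : Bool :=
                  (PySem.List.pyRange 0 (PySem.Str.len query) 1).foldl
                    (fun mtch offset =>
                      if PySem.List.pyGetD elem.toList (start_idx + offset) ' ' ≠
                          PySem.List.pyGetD query.toList offset ' ' then false else mtch)
                    true
                if mtch then true else found
              else found)
            false
        if found then acc ++ [elem] else acc) []
  let ranked_results : List (String × Int) :=
    filtered_results_pass1.foldl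
      (fun acc candidate =>
        let occurrence_count : Int :=
          (PySem.List.pyRange 0 (PySem.Str.len candidate) 1).foldl
            (fun cnt start_idx =>
              if PySem.Str.len candidate - start_idx ≥ PySem.Str.len query then
                let mtch : Bool :=
                  (PySem.List.pyRange 0 (PySem.Str.len query) 1).foldl
                    (fun mtch offset =>
                      if PySem.List.pyGetD candidate.toList (start_idx + offset) ' ' ≠
                          PySem.List.pyGetD query.toList offset ' ' then false else mtch)
                    true
                if mtch then cnt + 1 else cnt
              else cnt) 0
        acc ++ [(candidate, occurrence_count)]) []
  let deduplicated_results : List (String × Int) :=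
    ranked_results.foldl
      (fun acc p =>
        let already_present : Bool :=
          acc.foldl (fun ap q => if q.1 == p.1 then true else ap) false
        if already_present then acc else acc ++ [p]) []
  let sorted_dd : List (String × Int) :=
    (PySem.List.pyRange 0 (PySem.List.len deduplicated_results) 1).foldl
      (fun l _ =>
        (PySem.List.pyRange 0 (PySem.List.len l - 1) 1).foldl
          (fun l2 j =>
            if (PySem.List.pyGetD l2 j ("", 0)).2 < (PySem.List.pyGetD l2 (j + 1) ("", 0)).2 then
              let temp := PySem.List.pyGetD l2 j ("", 0)
              PySem.List.pySetD
                (PySem.List.pySetD l2 j (PySem.List.pyGetD l2 (j + 1) ("", 0))) (j + 1) temp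
            else l2) l) deduplicated_results
  sorted_dd.foldl (fun acc p => acc ++ [p.1]) []

-- ===== PORT B =====
def search_function_alt (data : List String) (query : String) : List String :=
  let m := PySem.Str.len query
  let counts : PySem.Dict String Int :=
    data.foldl
      (fun d elem =>
        if d.contains elem then d
        else
          let c : Int :=
            (PySem.List.pyRange 0 (PySem.Str.len elem - m + 1) 1).foldl
              (fun c i =>
                if PySem.List.slice elem.toList (some i) (some (i + m)) = query.toList then
                  c + 1
                else c) 0
          if c > 0 then d.insert elem c else d)
      PySem.Dict.empty
  let ranked := PySem.List.sorted counts.items (fun kv => -kv.2) false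
  ranked.map (fun kv => kv.1)

-- ===== PRECONDITION & SPEC =====
-- When query is "" and data contains "", A's hand-rolled matcher (scanning start positions
-- 0..len(elem)-1) never matches the empty query against the empty string and silently drops it,
-- while B, like Python's 'in'/slicing convention, keeps it; B's is the intended behaviour.
def D_search_function (data : List String) (query : String) : Prop :=
  query = "" ∧ "" ∈ data
instance (data : List String) (query : String) : Decidable (D_search_function data query) := by
  unfold D_search_function; infer_instance

def Spec_search_function (data : List String) (query : String) (out : List String) : Prop :=
  ¬ D_search_function data query → out = search_function_alt data query
instance (data : List String) (query : String) (out : List String) :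
    Decidable (Spec_search_function data query out) := by
  unfold Spec_search_function; infer_instance

def pvDiffWitness_search_function : List String × String := (["ab", ""], "")
def pvDiffWitnessOut_search_function : (List String) × (List String) := (["ab"], ["ab", ""])

-- ===== CLAIM (what is proved, stated in full; the proofs are below) =====
def Claim_unchanged_search_function : Prop :=
  ∀ (data : List String) (query : String), Dom_search_function data query →
    Spec_search_function data query (search_function data query)
def Claim_changed_search_function : Prop :=
  Dom_search_function (pvDiffWitness_search_function.1) (pvDiffWitness_search_function.2) ∧
  D_search_function (pvDiffWitness_search_function.1) (pvDiffWitness_search_function.2) ∧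
  search_function (pvDiffWitness_search_function.1) (pvDiffWitness_search_function.2) =
    pvDiffWitnessOut_search_function.1 ∧
  search_function_alt (pvDiffWitness_search_function.1) (pvDiffWitness_search_function.2) =
    pvDiffWitnessOut_search_function.2 ∧
  pvDiffWitnessOut_search_function.1 ≠ pvDiffWitnessOut_search_function.2
def Claim_exact_search_function : Prop :=
  ∀ (data : List String) (query : String), Dom_search_function data query →
    D_search_function data query → search_function data query ≠ search_function_alt data query

-- ===== LEMMAS AND PROOFS =====

def pvPass : List (String × Int) → List (String × Int)
  | [] => []
  | [a] => [a]
  | a :: b :: t => if a.2 < b.2 then b :: pvPass (a :: t) else a :: pvPass (b :: t)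
termination_by l => l.length
decreasing_by all_goals simp

theorem pvPass_nil : pvPass [] = [] := by simp [pvPass]

theorem pvPass_perm (l : List (String × Int)) : (pvPass l).Perm l := by
  induction l using pvPass.induct with
  | case1 => simp [pvPass]
  | case2 a => simp [pvPass]
  | case3 a b t h ih => simp only [pvPass, if_pos h]; exact (ih.cons b).trans (List.Perm.swap a b t)
  | case4 a b t h ih => simp only [pvPass, if_neg h]; exact ih.cons a

theorem pvPass_filter (c : Int) (l : List (String × Int)) :
    (pvPass l).filter (fun x => x.2 == c) = l.filter (fun x => x.2 == c) := by
  induction l using pvPass.induct with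
  | case1 => simp [pvPass]
  | case2 a => simp [pvPass]
  | case3 a b t h ih =>
      simp only [pvPass, if_pos h]
      by_cases hb : b.2 = c <;> by_cases ha : a.2 = c <;>
        simp_all <;> omega
  | case4 a b t h ih =>
      simp only [pvPass, if_neg h]
      by_cases ha : a.2 = c <;> simp_all [List.filter_cons]

theorem pvPass_min_last (l : List (String × Int)) (hne : l ≠ []) :
    ∃ u m, pvPass l = u ++ [m] ∧ ∀ x ∈ l, m.2 ≤ x.2 := by
  induction l using pvPass.induct with
  | case1 => exact absurd rfl hne
  | case2 a => exact ⟨[], a, by simp [pvPass], by intro x hx; simp at hx; simp [hx]⟩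
  | case3 a b t h ih =>
      obtain ⟨u, m, hu, hm⟩ := ih (by simp)
      refine ⟨b :: u, m, by simp [pvPass, if_pos h, hu], ?_⟩
      intro x hx
      rcases List.mem_cons.1 hx with rfl | hx'
      · exact hm x (by simp)
      · rcases List.mem_cons.1 hx' with rfl | hx'
        · have := hm a (by simp); omega
        · exact hm x (by simp [hx'])
  | case4 a b t h ih =>
      obtain ⟨u, m, hu, hm⟩ := ih (by simp)
      refine ⟨a :: u, m, by simp [pvPass, if_neg h, hu], ?_⟩
      intro x hx
      rcases List.mem_cons.1 hx with rfl | hx'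
      · have := hm b (by simp); omega
      · exact hm x hx'

theorem pvPass_fixed_last (u : List (String × Int)) (m : String × Int)
    (h : ∀ x ∈ u, m.2 ≤ x.2) : pvPass (u ++ [m]) = pvPass u ++ [m] := by
  induction u using pvPass.induct with
  | case1 => simp [pvPass]
  | case2 a =>
      have := h a (by simp)
      simp [pvPass]; omega
  | case3 a b t hab ih =>
      have h' : ∀ x ∈ a :: t, m.2 ≤ x.2 := by
        intro x hx; apply h; simp at hx ⊢; tauto
      have hih := ih h'
      simp only [List.cons_append] at hih ⊢
      simp only [pvPass, if_pos hab, hih]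
      rw [List.cons_append]
  | case4 a b t hab ih =>
      have h' : ∀ x ∈ b :: t, m.2 ≤ x.2 := by
        intro x hx; apply h; simp at hx ⊢; tauto
      have hih := ih h'
      simp only [List.cons_append] at hih ⊢
      simp only [pvPass, if_neg hab, hih]
      rw [List.cons_append]

theorem pvPass_iter_perm (n : ℕ) (l : List (String × Int)) : (pvPass^[n] l).Perm l := by
  induction n generalizing l with
  | zero => simp
  | succ n ih => rw [Function.iterate_succ_apply]; exact (ih (pvPass l)).trans (pvPass_perm l)

theorem pvPass_iter_filter (n : ℕ) (c : Int) (l : List (String × Int)) :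
    (pvPass^[n] l).filter (fun x => x.2 == c) = l.filter (fun x => x.2 == c) := by
  induction n generalizing l with
  | zero => simp
  | succ n ih => rw [Function.iterate_succ_apply, ih, pvPass_filter]

theorem pvPass_iter_fixed_last (n : ℕ) (u : List (String × Int)) (m : String × Int)
    (h : ∀ x ∈ u, m.2 ≤ x.2) : pvPass^[n] (u ++ [m]) = pvPass^[n] u ++ [m] := by
  induction n generalizing u with
  | zero => simp
  | succ n ih =>
      rw [Function.iterate_succ_apply, Function.iterate_succ_apply,
        pvPass_fixed_last u m h, ih (pvPass u)
          (fun x hx => h x ((pvPass_perm u).mem_iff.1 hx))]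

theorem pvPass_iter_sorted (n : ℕ) (l : List (String × Int)) (h : l.length ≤ n) :
    (pvPass^[n] l).Pairwise (fun a b => b.2 ≤ a.2) := by
  induction n generalizing l with
  | zero =>
      have : l = [] := List.length_eq_zero_iff.1 (Nat.le_zero.1 h)
      simp [this]
  | succ n ih =>
      rcases eq_or_ne l [] with rfl | hne
      · rw [Function.iterate_fixed pvPass_nil]; exact List.Pairwise.nil
      · rw [Function.iterate_succ_apply]
        obtain ⟨u, m, hu, hm⟩ := pvPass_min_last l hne
        have hlen : u.length + 1 = l.length := by
          have := (pvPass_perm l).length_eq; rw [hu] at this; simpa using this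
        have humem : ∀ x ∈ u, m.2 ≤ x.2 := by
          intro x hx
          exact hm x ((pvPass_perm l).mem_iff.1 (by rw [hu]; exact List.mem_append_left _ hx))
        rw [hu, pvPass_iter_fixed_last n u m humem]
        rw [List.pairwise_append]
        refine ⟨ih u (by omega), by simp, ?_⟩
        intro x hx y hy
        simp at hy; subst hy
        exact humem x ((pvPass_iter_perm n u).mem_iff.1 hx)

theorem pvUniq (l₁ l₂ : List (String × Int)) (hp : l₁.Perm l₂)
    (h₁ : l₁.Pairwise (fun a b => b.2 ≤ a.2)) (h₂ : l₂.Pairwise (fun a b => b.2 ≤ a.2))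
    (hf : ∀ c : Int, l₁.filter (fun x => x.2 == c) = l₂.filter (fun x => x.2 == c)) :
    l₁ = l₂ := by
  induction l₁ generalizing l₂ with
  | nil => exact (hp.nil_eq).symm ▸ rfl
  | cons x t₁ ih =>
      rcases l₂ with _ | ⟨y, t₂⟩
      · exact absurd hp.symm (by simp)
      · have hxy2 : x.2 = y.2 := by
          have hy : y ∈ x :: t₁ := hp.mem_iff.2 (by simp)
          have hx : x ∈ y :: t₂ := hp.mem_iff.1 (by simp)
          have h1 : y.2 ≤ x.2 := by
            rcases List.mem_cons.1 hy with rfl | hy' 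
            · rfl
            · exact (List.pairwise_cons.1 h₁).1 y hy'
          have h2 : x.2 ≤ y.2 := by
            rcases List.mem_cons.1 hx with rfl | hx'
            · rfl
            · exact (List.pairwise_cons.1 h₂).1 x hx'
          omega
        have hfx := hf x.2
        rw [List.filter_cons, List.filter_cons] at hfx
        simp only [show (x.2 == x.2) = true by simp, show (y.2 == x.2) = true by simp [hxy2]] at hfx
        have hxy : x = y := by simpa using List.head_eq_of_cons_eq hfx
        subst hxy
        have hp' : t₁.Perm t₂ := hp.cons_inv
        refine congrArg (x :: ·) (ih t₂ hp' (List.pairwise_cons.1 h₁).2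
          (List.pairwise_cons.1 h₂).2 ?_)
        intro c
        by_cases hc : x.2 = c
        · have := hf c
          rw [List.filter_cons, List.filter_cons] at this
          simpa [hc] using this
        · have := hf c
          rw [List.filter_cons, List.filter_cons] at this
          simpa [show (x.2 == c) = false by simp [hc]] using this

theorem insertBy_filter_class (x : String × Int) (acc : List (String × Int)) (c : Int)
    (h : acc.Pairwise (fun a b => (-a.2 : Int) ≤ -b.2)) :
    (PySem.List.insertBy (fun a b => decide ((-a.2 : Int) < -b.2)) x acc).filter
        (fun p => p.2 == c)
      = acc.filter (fun p => p.2 == c) ++ if x.2 == c then [x] else [] := by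
  induction acc with
  | nil =>
      by_cases hxc : x.2 = c <;> simp [PySem.List.insertBy, hxc]
  | cons a acc ih =>
      by_cases hb : (-x.2 : Int) < -a.2
      · simp only [PySem.List.insertBy, decide_eq_true_eq, if_pos hb]
        by_cases hxc : x.2 = c
        · have hnone : ∀ y ∈ a :: acc, ¬ (y.2 = c) := by
            intro y hy
            rcases List.mem_cons.1 hy with rfl | hy'
            · omega
            · have := (List.pairwise_cons.1 h).1 y hy'; omega
          have : (a :: acc).filter (fun p => p.2 == c) = [] := by
            rw [List.filter_eq_nil_iff]
            intro y hy; simpa using hnone y hy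
          simp [List.filter_cons, this, hxc, hnone a (by simp)]
        · simp [List.filter_cons, hxc]
      · simp only [PySem.List.insertBy, decide_eq_true_eq, if_neg hb]
        rw [List.filter_cons, List.filter_cons]
        rw [ih (List.pairwise_cons.1 h).2]
        by_cases hac : a.2 = c <;> simp [hac]

theorem sorted_filter_class (l : List (String × Int)) (c : Int) :
    (PySem.List.sorted l (fun p => (-p.2 : Int)) false).filter (fun x => x.2 == c)
      = l.filter (fun x => x.2 == c) := by
  induction l using List.reverseRecOn with
  | nil => simp [PySem.List.sorted]
  | append_singleton l x ih =>
      rw [PySem.List.sorted_eq_foldl_insertBy, List.foldl_append, List.foldl_cons, List.foldl_nil,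
        ← PySem.List.sorted_eq_foldl_insertBy]
      rw [insertBy_filter_class x _ c (PySem.List.sorted_pairwise l (fun p => (-p.2 : Int)))]
      rw [ih, List.filter_append, List.filter_cons]
      simp [List.filter_nil]

theorem pvBubbleEq (l : List (String × Int)) :
    pvPass^[l.length] l = PySem.List.sorted l (fun p => (-p.2 : Int)) false := by
  apply pvUniq
  · exact (pvPass_iter_perm _ l).trans (PySem.List.sorted_perm l _ false).symm
  · exact pvPass_iter_sorted _ l le_rfl
  · exact (PySem.List.sorted_pairwise l (fun p => (-p.2 : Int))).imp (by intro a b h; omega)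
  · intro c; rw [pvPass_iter_filter, sorted_filter_class]

theorem sorted_map_shift (l : List (String × Int)) :
    PySem.List.sorted (l.map (fun p => (p.1, p.2 + 1))) (fun p => (-p.2 : Int)) false
      = (PySem.List.sorted l (fun p => (-p.2 : Int)) false).map (fun p => (p.1, p.2 + 1)) := by
  apply pvUniq
  · exact (PySem.List.sorted_perm _ _ false).trans ((PySem.List.sorted_perm l _ false).map _).symm
  · exact (PySem.List.sorted_pairwise _ _).imp (by intro a b h; omega)
  · exact ((PySem.List.sorted_pairwise l (fun p => (-p.2 : Int))).map _ (by intro a b h; simp; omega))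
  · intro c
    rw [sorted_filter_class, List.filter_map, List.filter_map]
    have hpred : ∀ (m : List (String × Int)),
        m.filter ((fun x => x.2 == c) ∘ (fun p => (p.1, p.2 + 1)))
          = m.filter (fun x => x.2 == c - 1) := by
      intro m; apply List.filter_congr; intro p _
      simp only [Function.comp]
      by_cases h : p.2 = c - 1 <;> simp [h] <;> omega
    rw [hpred, hpred, sorted_filter_class]

-- ===== generic =====
theorem pvFoldlConstIterate {α β : Type} (xs : List β) (f : α → α) (a : α) :
    xs.foldl (fun acc _ => f acc) a = f^[xs.length] a := by
  induction xs generalizing a with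
  | nil => simp
  | cons x xs ih => simp [ih, Function.iterate_succ_apply]

theorem pvAnyCountP {α : Type} (l : List α) (p : α → Bool) :
    l.any p = decide (0 < l.countP p) := by
  induction l with
  | nil => simp
  | cons x l ih => cases hx : p x <;> simp [List.countP_cons, hx, ih]

-- ===== index-fold bubble pass = structural pass =====
def pvStepN (l2 : List (String × Int)) (j : Nat) : List (String × Int) :=
  if (l2.getD j ("", 0)).2 < (l2.getD (j + 1) ("", 0)).2 then
    (l2.set j (l2.getD (j + 1) ("", 0))).set (j + 1) (l2.getD j ("", 0))
  else l2

theorem pvStepN_cons (c : String × Int) (l2 : List (String × Int)) (j : Nat) :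
    pvStepN (c :: l2) (j + 1) = c :: pvStepN l2 j := by
  unfold pvStepN
  rw [List.getD_cons_succ, List.getD_cons_succ]
  by_cases h : (l2.getD j ("", 0)).2 < (l2.getD (j + 1) ("", 0)).2
  · rw [if_pos h, if_pos h, List.set_cons_succ, List.set_cons_succ]
  · rw [if_neg h, if_neg h]

theorem pvFoldlStepNShift (js : List Nat) (c : String × Int) (l : List (String × Int)) :
    js.foldl (fun l2 j => pvStepN l2 (j + 1)) (c :: l) = c :: js.foldl pvStepN l := by
  induction js generalizing l with
  | nil => rfl
  | cons j js ih => simp only [List.foldl_cons, pvStepN_cons, ih]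

theorem pvFoldlRangeStepN (l : List (String × Int)) :
    (List.range (l.length - 1)).foldl pvStepN l = pvPass l := by
  induction l using pvPass.induct with
  | case1 => simp [pvPass]
  | case2 a => simp [pvPass]
  | case3 a b t h ih =>
      have hlen : (a :: b :: t).length - 1 = t.length + 1 := by simp
      rw [hlen, List.range_succ_eq_map, List.foldl_cons, List.foldl_map]
      have h0 : pvStepN (a :: b :: t) 0 = b :: a :: t := by
        simp [pvStepN, h]
      rw [h0]
      simp only [Nat.succ_eq_add_one]
      rw [show (b :: a :: t : List (String × Int)) = b :: (a :: t) from rfl,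
        pvFoldlStepNShift]
      have := ih
      rw [show (a :: t : List (String × Int)).length - 1 = t.length by simp] at this
      rw [this]
      simp [pvPass, h]
  | case4 a b t h ih =>
      have hlen : (a :: b :: t).length - 1 = t.length + 1 := by simp
      rw [hlen, List.range_succ_eq_map, List.foldl_cons, List.foldl_map]
      have h0 : pvStepN (a :: b :: t) 0 = a :: b :: t := by
        simp [pvStepN, h]
      rw [h0]
      simp only [Nat.succ_eq_add_one]
      rw [show (a :: b :: t : List (String × Int)) = a :: (b :: t) from rfl,
        pvFoldlStepNShift]
      have := ih
      rw [show (b :: t : List (String × Int)).length - 1 = t.length by simp] at this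
      rw [this]
      simp [pvPass, h]

theorem pvPortInnerPass (l : List (String × Int)) :
    (PySem.List.pyRange 0 (PySem.List.len l - 1) 1).foldl
      (fun l2 j =>
        if (PySem.List.pyGetD l2 j ("", 0)).2 < (PySem.List.pyGetD l2 (j + 1) ("", 0)).2 then
          PySem.List.pySetD
            (PySem.List.pySetD l2 j (PySem.List.pyGetD l2 (j + 1) ("", 0))) (j + 1)
            (PySem.List.pyGetD l2 j ("", 0))
        else l2) l = pvPass l := by
  rw [PySem.List.len_eq, PySem.List.pyRange_zero, List.foldl_map]
  have ht : ((l.length : Int) - 1).toNat = l.length - 1 := by omega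
  rw [ht]
  have hb : ∀ (l2 : List (String × Int)) (j : Nat),
      (if (PySem.List.pyGetD l2 (j : Int) ("", 0)).2 <
            (PySem.List.pyGetD l2 ((j : Int) + 1) ("", 0)).2 then
          PySem.List.pySetD
            (PySem.List.pySetD l2 (j : Int) (PySem.List.pyGetD l2 ((j : Int) + 1) ("", 0)))
            ((j : Int) + 1) (PySem.List.pyGetD l2 (j : Int) ("", 0))
        else l2) = pvStepN l2 j := by
    intro l2 j
    have hc : ((j : Int) + 1) = ((j + 1 : Nat) : Int) := by push_cast; ring
    simp only [hc, PySem.List.pyGetD_natCast, PySem.List.pySetD_natCast]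
    rfl
  simp only [hb]
  exact pvFoldlRangeStepN l

theorem pvPortSort (dd : List (String × Int)) :
    (PySem.List.pyRange 0 (PySem.List.len dd) 1).foldl
      (fun l _ =>
        (PySem.List.pyRange 0 (PySem.List.len l - 1) 1).foldl
          (fun l2 j =>
            if (PySem.List.pyGetD l2 j ("", 0)).2 < (PySem.List.pyGetD l2 (j + 1) ("", 0)).2 then
              PySem.List.pySetD
                (PySem.List.pySetD l2 j (PySem.List.pyGetD l2 (j + 1) ("", 0))) (j + 1)
                (PySem.List.pyGetD l2 j ("", 0))
            else l2) l) dd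
      = PySem.List.sorted dd (fun p => (-p.2 : Int)) false := by
  simp only [pvPortInnerPass]
  rw [pvFoldlConstIterate]
  rw [PySem.List.len_eq, PySem.List.pyRange_zero]
  simp only [List.length_map, List.length_range, Int.toNat_natCast]
  exact pvBubbleEq dd

-- ===== occurrence counting =====
def pvMatchN (q e : List Char) (j : Nat) : Bool :=
  decide ((e.length : Int) - (j : Int) ≥ (q.length : Int)) &&
  ((List.range q.length).foldl
    (fun m off => if e.getD (j + off) ' ' ≠ q.getD off ' ' then false else m) true)

def pvOcc (q e : List Char) : Nat :=
  (List.range (e.length + 1 - q.length)).countP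
    (fun j => decide ((e.drop j).take q.length = q))

theorem pvMatchN_fold (q e : List Char) (j : Nat) :
    ((List.range q.length).foldl
      (fun m off => if e.getD (j + off) ' ' ≠ q.getD off ' ' then false else m) true)
    = (List.range q.length).all (fun off => decide (e.getD (j + off) ' ' = q.getD off ' ')) := by
  have hstep : (fun (m : Bool) (off : Nat) =>
        if e.getD (j + off) ' ' ≠ q.getD off ' ' then false else m)
      = (fun m off =>
          if (fun o => decide (e.getD (j + o) ' ' ≠ q.getD o ' ')) off = true then false else m) := by
    funext m off
    by_cases h : e.getD (j + off) ' ' ≠ q.getD off ' ' <;> simp [h]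
  rw [hstep, PySem.List.foldl_if_false_eq]
  simp only [Bool.true_and, decide_not]
  rw [← List.all_eq_not_any_not]

theorem pvMatchN_eq (q e : List Char) (hq : q ≠ []) (j : Nat) :
    pvMatchN q e j = decide ((e.drop j).take q.length = q) := by
  have hq0 : 0 < q.length := List.length_pos_iff.mpr hq
  unfold pvMatchN
  rw [pvMatchN_fold]
  by_cases hsl : (e.drop j).take q.length = q
  · have hlen : min q.length (e.length - j) = q.length := by
      have := congrArg List.length hsl
      simpa [List.length_take, List.length_drop] using this
    have hmin : q.length ≤ e.length - j := by
      rcases Nat.le_total q.length (e.length - j) with h | h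
      · exact h
      · omega
    have hb : j + q.length ≤ e.length := by omega
    simp only [hsl, decide_true]
    rw [Bool.and_eq_true]
    constructor
    · rw [decide_eq_true_eq]; push_cast; omega
    · rw [List.all_eq_true]
      intro off hoff
      have hoff' : off < q.length := List.mem_range.mp hoff
      have h1 : q.getD off ' ' = e.getD (j + off) ' ' := by
        conv_lhs => rw [← hsl]
        rw [List.getD_eq_getElem _ _ (by simp [List.length_take, List.length_drop]; omega),
          List.getElem_take, List.getElem_drop,
          List.getD_eq_getElem _ _ (by omega)]
      simpa using h1.symm
  · simp only [hsl, decide_false]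
    by_cases hA : ((e.length : Int) - (j : Int) ≥ (q.length : Int))
    · have hb : j + q.length ≤ e.length := by omega
      rw [Bool.and_eq_false_iff]
      right
      cases hall : (List.range q.length).all
          (fun off => decide (e.getD (j + off) ' ' = q.getD off ' ')) with
      | false => rfl
      | true =>
          exfalso
          apply hsl
          have hall' := List.all_eq_true.mp hall
          apply List.ext_getElem
          · simp only [List.length_take, List.length_drop]; omega
          · intro i h1 h2
            have hi : i < q.length := h2
            have heq : e.getD (j + i) ' ' = q.getD i ' ' := by
              have := hall' i (List.mem_range.mpr hi)
              simpa using this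
            rw [List.getElem_take, List.getElem_drop]
            rw [List.getD_eq_getElem _ _ (by omega), List.getD_eq_getElem _ _ (by omega)] at heq
            exact heq
    · rw [Bool.and_eq_false_iff]
      left
      simpa using hA

theorem pvCountA_eq (q e : List Char) (hq : q ≠ []) :
    (List.range e.length).countP (pvMatchN q e) = pvOcc q e := by
  have hq0 : 0 < q.length := List.length_pos_iff.mpr hq
  have hcongr : (List.range e.length).countP (pvMatchN q e)
      = (List.range e.length).countP (fun j => decide ((e.drop j).take q.length = q)) := by
    apply List.countP_congr
    intro j _
    rw [pvMatchN_eq q e hq j]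
  rw [hcongr]
  unfold pvOcc
  have hzero : ∀ (js : List Nat), (∀ j ∈ js, e.length < j + q.length) →
      js.countP (fun j => decide ((e.drop j).take q.length = q)) = 0 := by
    intro js hjs
    rw [List.countP_eq_zero]
    intro j hj
    simp only [decide_eq_true_eq]
    intro heq
    have := congrArg List.length heq
    simp only [List.length_take, List.length_drop] at this
    have := hjs j hj
    omega
  by_cases hle : q.length ≤ e.length
  · have hsplit : e.length = (e.length + 1 - q.length) + (q.length - 1) := by omega
    conv_lhs => rw [hsplit]
    rw [List.range_add, List.countP_append]
    rw [hzero ((List.range (q.length - 1)).map (fun i => (e.length + 1 - q.length) + i)) ?_]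
    · omega
    · intro j hj
      simp only [List.mem_map, List.mem_range] at hj
      obtain ⟨i, hi, rfl⟩ := hj
      omega
  · have h1 : e.length + 1 - q.length = 0 := by omega
    rw [h1, List.range_zero, List.countP_nil]
    apply hzero
    intro j hj
    have := List.mem_range.mp hj
    omega

theorem pvMatchN_nil (e : List Char) (j : Nat) :
    pvMatchN [] e j = decide (j ≤ e.length) := by
  unfold pvMatchN
  simp only [List.length_nil, List.range_zero, List.foldl_nil, Bool.and_true, Nat.cast_zero]
  rw [decide_eq_decide]
  omega

theorem pvCountA_nil (e : List Char) :
    (List.range e.length).countP (pvMatchN [] e) = e.length := by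
  have : (List.range e.length).countP (pvMatchN [] e) = (List.range e.length).length := by
    rw [List.countP_eq_length]
    intro j hj
    rw [pvMatchN_nil]
    simp only [decide_eq_true_eq]
    have := List.mem_range.mp hj
    omega
  rw [this, List.length_range]

theorem pvOcc_nil (e : List Char) : pvOcc [] e = e.length + 1 := by
  unfold pvOcc
  simp only [List.length_nil, Nat.sub_zero, List.take_zero]
  rw [List.countP_eq_length.mpr (by intro j _; simp), List.length_range]

def pvFA (query e : String) : Bool :=
  (List.range e.toList.length).any (pvMatchN query.toList e.toList)

def pvCA (query e : String) : Int :=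
  ((List.range e.toList.length).countP (pvMatchN query.toList e.toList) : Int)

theorem pvFA_pos (query e : String) (hq : query.toList ≠ []) :
    pvFA query e = decide (0 < pvOcc query.toList e.toList) := by
  unfold pvFA
  rw [pvAnyCountP, pvCountA_eq _ _ hq]

theorem pvCA_pos (query e : String) (hq : query.toList ≠ []) :
    pvCA query e = (pvOcc query.toList e.toList : Int) := by
  unfold pvCA
  rw [pvCountA_eq _ _ hq]

theorem pvFA_nil (e : String) : pvFA "" e = decide (0 < e.toList.length) := by
  unfold pvFA
  rw [pvAnyCountP]
  rw [show ("" : String).toList = [] from rfl, pvCountA_nil]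

theorem pvCA_nil (e : String) : pvCA "" e = (e.toList.length : Int) := by
  unfold pvCA
  rw [show ("" : String).toList = [] from rfl, pvCountA_nil]


-- ===== set lemmas =====
theorem pvOfListFilter (p : String → Bool) (l : List String) :
    PySem.Set.ofList (l.filter p) = (PySem.Set.ofList l).filter p := by
  induction l using List.reverseRecOn with
  | nil => rfl
  | append_singleton l x ih =>
      rw [List.filter_append, PySem.Set.ofList_append_singleton]
      by_cases hpx : p x
      · rw [show List.filter p [x] = [x] by simp [hpx]]
        rw [PySem.Set.ofList_append_singleton]
        by_cases hxl : x ∈ l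
        · rw [PySem.Set.add_of_mem (by rw [PySem.Set.mem_ofList]; exact List.mem_filter.mpr ⟨hxl, hpx⟩)]
          rw [PySem.Set.add_of_mem (by rw [PySem.Set.mem_ofList]; exact hxl)]
          exact ih
        · rw [PySem.Set.add_of_not_mem
            (by rw [PySem.Set.mem_ofList]; intro h; exact hxl (List.mem_of_mem_filter h))]
          rw [PySem.Set.add_of_not_mem (by rw [PySem.Set.mem_ofList]; exact hxl)]
          rw [List.filter_append, ih]
          simp [hpx]
      · rw [show List.filter p [x] = [] by simp [hpx], List.append_nil]
        by_cases hxl : x ∈ l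
        · rw [PySem.Set.add_of_mem (by rw [PySem.Set.mem_ofList]; exact hxl)]
          exact ih
        · rw [PySem.Set.add_of_not_mem (by rw [PySem.Set.mem_ofList]; exact hxl)]
          rw [List.filter_append, ih]
          simp [hpx]

theorem pvFoldlAddTrip (l : List String) :
    ∀ (s : PySem.Set String),
      (l.flatMap (fun e => [e, e, e])).foldl PySem.Set.add s = l.foldl PySem.Set.add s := by
  induction l with
  | nil => intro s; rfl
  | cons x l ih =>
      intro s
      rw [List.flatMap_cons, List.foldl_append]
      have h3 : ([x, x, x] : List String).foldl PySem.Set.add s = PySem.Set.add s x := by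
        have hmem : x ∈ PySem.Set.add s x := by
          rw [PySem.Set.add_eq_ite]
          by_cases h : x ∈ s
          · simpa [h] using h
          · simp [h]
        simp only [List.foldl_cons, List.foldl_nil]
        rw [PySem.Set.add_of_mem hmem, PySem.Set.add_of_mem hmem]
      rw [h3, ih, List.foldl_cons]

theorem pvOfListTrip (l : List String) :
    PySem.Set.ofList (l.flatMap (fun e => [e, e, e])) = PySem.Set.ofList l := by
  rw [PySem.Set.ofList_eq_foldl, PySem.Set.ofList_eq_foldl, pvFoldlAddTrip]

theorem pvFilterTrip (p : String → Bool) (l : List String) :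
    (l.flatMap (fun e => [e, e, e])).filter p = (l.filter p).flatMap (fun e => [e, e, e]) := by
  induction l with
  | nil => rfl
  | cons x l ih =>
      rw [List.flatMap_cons, List.filter_append, ih, List.filter_cons]
      by_cases hpx : p x <;> simp [hpx]

-- ===== dedup fold =====
theorem pvDedupFold (xs : List String) (c : String → Int) :
    (xs.map (fun e => (e, c e))).foldl
      (fun acc p =>
        if (acc.foldl (fun ap q => if q.1 == p.1 then true else ap) false) = true then acc
        else acc ++ [p]) []
      = (PySem.Set.ofList xs).map (fun e => (e, c e)) := by
  induction xs using List.reverseRecOn with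
  | nil => rfl
  | append_singleton xs x ih =>
      rw [List.map_append, List.foldl_append, ih]
      simp only [List.map_cons, List.map_nil, List.foldl_cons, List.foldl_nil]
      rw [PySem.List.foldl_if_true_eq]
      simp only [Bool.false_or]
      rw [List.any_map]
      have hcomp : ((fun (q : String × Int) => q.1 == (x, c x).1) ∘ (fun e => (e, c e)))
          = fun e => e == x := by
        funext e; rfl
      rw [hcomp]
      rw [PySem.Set.ofList_append_singleton]
      by_cases hx : x ∈ xs
      · rw [show (PySem.Set.ofList xs).any (fun e => e == x) = true from
          List.any_eq_true.mpr ⟨x, (PySem.Set.mem_ofList xs x).mpr hx, by simp⟩]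
        rw [PySem.Set.add_of_mem ((PySem.Set.mem_ofList xs x).mpr hx)]
        simp
      · have hnx : x ∉ PySem.Set.ofList xs := fun h => hx ((PySem.Set.mem_ofList xs x).mp h)
        rw [show (PySem.Set.ofList xs).any (fun e => e == x) = false from
          List.any_eq_false.mpr (fun e he => by
            simp only [beq_iff_eq]
            intro heq
            exact hnx (heq ▸ he))]
        rw [PySem.Set.add_of_not_mem hnx, List.map_append]
        simp

-- ===== dict fold =====
theorem pvDictFold (cf : String → Int) (xs : List String) :
    ∀ (s : PySem.Set String) (d : PySem.Dict String Int),
      d.items = (s.filter (fun e => decide (cf e > 0))).map (fun e => (e, cf e)) →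
      (xs.foldl
        (fun d elem =>
          if d.contains elem = true then d
          else if cf elem > 0 then d.insert elem (cf elem) else d) d).items
      = ((PySem.Set.update s xs).filter (fun e => decide (cf e > 0))).map (fun e => (e, cf e)) := by
  induction xs with
  | nil =>
      intro s d hd
      simpa [PySem.Set.update] using hd
  | cons x xs ih =>
      intro s d hd
      rw [List.foldl_cons, PySem.Set.update_cons]
      have hkeys : d.keys = s.filter (fun e => decide (cf e > 0)) := by
        simp only [PySem.Dict.keys, hd, List.map_map]
        have : ((fun (x : String × Int) => x.1) ∘ fun e => (e, cf e)) = id := funext fun e => rfl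
        rw [this, List.map_id]
      have hcont : d.contains x = decide (x ∈ s ∧ cf x > 0) := by
        rw [PySem.Dict.contains_eq_decide_mem_keys, hkeys]
        rw [decide_eq_decide]
        rw [List.mem_filter]
        simp
      by_cases hin : x ∈ s ∧ cf x > 0
      · rw [hcont, decide_eq_true hin]
        simp only [if_pos rfl]
        rw [PySem.Set.add_of_mem hin.1]
        exact ih s d hd
      · have hcf : d.contains x = false := by rw [hcont, decide_eq_false hin]
        rw [hcf]
        simp only [Bool.false_eq_true, if_neg not_false]
        by_cases hpos : cf x > 0
        · rw [if_pos hpos]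
          have hxs : x ∉ s := fun hx => hin ⟨hx, hpos⟩
          apply ih (s.add x)
          rw [PySem.Dict.items_insert_of_not_contains _ _ hcf]
          rw [hd, PySem.Set.add_of_not_mem hxs, List.filter_append, List.map_append]
          simp [hpos]
        · rw [if_neg hpos]
          apply ih (s.add x)
          rw [hd]
          by_cases hxs : x ∈ s
          · rw [PySem.Set.add_of_mem hxs]
          · rw [PySem.Set.add_of_not_mem hxs, List.filter_append]
            simp [hpos]

-- ===== reduction of the per-element matching loops =====
theorem pvCondEq (query elem : String) (j : Nat) {α : Type} (a b : α) :
    (if ((elem.toList.length : Int)) - ((j : Nat) : Int) ≥ ((query.toList.length : Int)) then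
      (if (List.range query.toList.length).foldl
          (fun mtch o =>
            if PySem.List.pyGetD elem.toList (((j : Nat) : Int) + ((o : Nat) : Int)) ' ' ≠
                PySem.List.pyGetD query.toList ((o : Nat) : Int) ' ' then false else mtch)
          true = true
        then a else b)
      else b)
    = if pvMatchN query.toList elem.toList j = true then a else b := by
  have hcast : ∀ o : Nat, (((j : Nat) : Int) + ((o : Nat) : Int)) = (((j + o : Nat)) : Int) := by
    intro o; push_cast; ring
  simp only [hcast, PySem.List.pyGetD_natCast]
  unfold pvMatchN
  by_cases hb : ((elem.toList.length : Int)) - ((j : Nat) : Int) ≥ ((query.toList.length : Int))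
  · rw [if_pos hb, decide_eq_true hb, Bool.true_and]
  · rw [if_neg hb, decide_eq_false hb, Bool.false_and]
    simp

theorem pvFoundRed (query elem : String) :
    ((PySem.List.pyRange 0 (PySem.Str.len elem) 1).foldl
      (fun found start_idx =>
        if PySem.Str.len elem - start_idx ≥ PySem.Str.len query then
          if (PySem.List.pyRange 0 (PySem.Str.len query) 1).foldl
              (fun mtch offset =>
                if PySem.List.pyGetD elem.toList (start_idx + offset) ' ' ≠
                    PySem.List.pyGetD query.toList offset ' ' then false else mtch)
              true = true then true
          else found
        else found)
      false) = pvFA query elem := by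
  simp only [PySem.Str.len_eq, PySem.List.pyRange_zero_nat, List.foldl_map]
  simp only [pvCondEq query elem]
  rw [PySem.List.foldl_if_true_eq]
  simp only [Bool.false_or]
  rfl

theorem pvCountRed (query candidate : String) :
    ((PySem.List.pyRange 0 (PySem.Str.len candidate) 1).foldl
      (fun cnt start_idx =>
        if PySem.Str.len candidate - start_idx ≥ PySem.Str.len query then
          if (PySem.List.pyRange 0 (PySem.Str.len query) 1).foldl
              (fun mtch offset =>
                if PySem.List.pyGetD candidate.toList (start_idx + offset) ' ' ≠
                    PySem.List.pyGetD query.toList offset ' ' then false else mtch)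
              true = true then cnt + 1
          else cnt
        else cnt)
      (0 : Int)) = pvCA query candidate := by
  simp only [PySem.Str.len_eq, PySem.List.pyRange_zero_nat, List.foldl_map]
  simp only [pvCondEq query candidate]
  rw [PySem.List.foldl_if_add_one (fun j => pvMatchN query.toList candidate.toList j) _ 0]
  simp only [zero_add]
  rfl

theorem pvCountBRed (query elem : String) :
    ((PySem.List.pyRange 0 (PySem.Str.len elem - PySem.Str.len query + 1) 1).foldl
      (fun c i =>
        if PySem.List.slice elem.toList (some i) (some (i + PySem.Str.len query)) = query.toList
        then c + 1 else c) (0 : Int))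
    = ((pvOcc query.toList elem.toList : Nat) : Int) := by
  simp only [PySem.Str.len_eq]
  rw [PySem.List.pyRange_zero]
  have ht : (((elem.toList.length : Int)) - (query.toList.length : Int) + 1).toNat
      = elem.toList.length + 1 - query.toList.length := by omega
  rw [ht, List.foldl_map]
  simp only [PySem.List.slice_natCast_add]
  rw [PySem.List.foldl_ite_add_one]
  simp only [zero_add]
  rfl

-- ===== canonical intermediate lists =====
def pvDDA (data : List String) (query : String) : List (String × Int) :=
  (PySem.Set.ofList (data.filter (pvFA query))).map (fun e => (e, pvCA query e))

def pvDDB (data : List String) (query : String) : List (String × Int) :=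
  ((PySem.Set.ofList data).filter
      (fun e => decide (((pvOcc query.toList e.toList : Nat) : Int) > 0))).map
    (fun e => (e, ((pvOcc query.toList e.toList : Nat) : Int)))

theorem pvAred (data : List String) (query : String) :
    search_function data query
      = (PySem.List.sorted (pvDDA data query) (fun p => (-p.2 : Int)) false).map
          (fun p => p.1) := by
  simp only [search_function]
  rw [PySem.List.len_eq data]
  rw [PySem.List.foldl_pyRange_zero_pyGetD' data ""
    (fun acc e => (PySem.List.pyRange 0 3 1).foldl (fun acc2 _ => acc2 ++ [e]) acc) []]
  have h3 : ∀ (acc : List String) (e : String),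
      (PySem.List.pyRange 0 3 1).foldl (fun acc2 _ => acc2 ++ [e]) acc = acc ++ [e, e, e] := by
    intro acc e
    rw [show PySem.List.pyRange 0 3 1 = [0, 1, 2] by decide]
    simp
  simp only [h3]
  rw [PySem.List.foldl_append_eq_flatMap (fun e => [e, e, e]) data []]
  simp only [List.nil_append]
  simp only [pvFoundRed query]
  rw [PySem.List.foldl_append_if_eq_filter (pvFA query) _ []]
  simp only [List.nil_append]
  simp only [pvCountRed query]
  rw [PySem.List.foldl_append_singleton_eq_map (fun c => (c, pvCA query c)) _ []]
  simp only [List.nil_append]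
  rw [pvDedupFold _ (pvCA query)]
  rw [pvFilterTrip (pvFA query) data, pvOfListTrip (data.filter (pvFA query))]
  rw [pvPortSort]
  rw [PySem.List.foldl_append_singleton_eq_map (fun p : String × Int => p.1) _ []]
  simp only [List.nil_append]
  rfl

theorem pvBred (data : List String) (query : String) :
    search_function_alt data query
      = (PySem.List.sorted (pvDDB data query) (fun kv => (-kv.2 : Int)) false).map
          (fun kv => kv.1) := by
  simp only [search_function_alt]
  simp only [pvCountBRed query]
  rw [pvDictFold (fun e => ((pvOcc query.toList e.toList : Nat) : Int)) data [] PySem.Dict.empty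
    rfl]
  rw [show PySem.Set.update ([] : PySem.Set String) data = PySem.Set.ofList data from
    PySem.Set.update_empty data]
  rfl

theorem pvMain (data : List String) (query : String)
    (hnd : ¬ (query = "" ∧ ("" : String) ∈ data)) :
    search_function data query = search_function_alt data query := by
  rw [pvAred, pvBred]
  by_cases hq : query = ""
  · subst hq
    have hne : ("" : String) ∉ data := fun h => hnd ⟨rfl, h⟩
    have htl : ("" : String).toList = [] := rfl
    unfold pvDDA pvDDB
    simp only [htl]
    have hfa : data.filter (pvFA "") = data := by
      apply List.filter_eq_self.mpr
      intro e he
      rw [pvFA_nil]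
      simp only [decide_eq_true_eq]
      rcases Nat.eq_zero_or_pos e.toList.length with h0 | h0
      · exfalso
        apply hne
        have he0 : e = "" := String.toList_inj.mp (by rw [List.length_eq_zero_iff.mp h0]; rfl)
        rwa [he0] at he
      · exact h0
    have hfb : (PySem.Set.ofList data).filter
        (fun e => decide (((pvOcc [] e.toList : Nat) : Int) > 0)) = PySem.Set.ofList data := by
      apply List.filter_eq_self.mpr
      intro e _
      simp only [pvOcc_nil, decide_eq_true_eq]
      push_cast
      omega
    rw [hfa, hfb]
    simp only [pvCA_nil, pvOcc_nil]
    have hshift : (fun e : String => (e, ((e.toList.length + 1 : Nat) : Int)))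
        = (fun p : String × Int => (p.1, p.2 + 1)) ∘
            (fun e : String => (e, (e.toList.length : Int))) := by
      funext e
      simp only [Function.comp_apply]
      rw [Prod.mk.injEq]
      exact ⟨rfl, by push_cast; ring⟩
    rw [hshift, ← List.map_map, sorted_map_shift, List.map_map]
    have hcomp : ((fun kv : String × Int => kv.1) ∘ (fun p : String × Int => (p.1, p.2 + 1)))
        = fun p : String × Int => p.1 := funext fun p => rfl
    rw [hcomp]
  · have hql : query.toList ≠ [] := fun h => hq (String.toList_inj.mp (by rw [h]; rfl))
    unfold pvDDA pvDDB
    have h1 : data.filter (pvFA query)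
        = data.filter (fun e => decide (((pvOcc query.toList e.toList : Nat) : Int) > 0)) := by
      apply List.filter_congr
      intro e _
      rw [pvFA_pos query e hql, decide_eq_decide]
      omega
    rw [h1, pvOfListFilter]
    have hca : ∀ e, pvCA query e = ((pvOcc query.toList e.toList : Nat) : Int) :=
      fun e => pvCA_pos query e hql
    simp only [hca]

theorem pvTight (data : List String) (query : String) (hq : query = "")
    (hmem : ("" : String) ∈ data) :
    search_function data query ≠ search_function_alt data query := by
  subst hq
  rw [pvAred, pvBred]
  intro heq
  have hB : ("" : String) ∈ (PySem.List.sorted (pvDDB data "") (fun kv => (-kv.2 : Int)) false).map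
      (fun kv => kv.1) := by
    apply List.mem_map.mpr
    refine ⟨(("" : String), ((pvOcc ("" : String).toList ("" : String).toList : Nat) : Int)),
      ?_, rfl⟩
    rw [PySem.List.mem_sorted]
    unfold pvDDB
    apply List.mem_map.mpr
    refine ⟨"", ?_, rfl⟩
    apply List.mem_filter.mpr
    refine ⟨(PySem.Set.mem_ofList data "").mpr hmem, ?_⟩
    rw [show ("" : String).toList = [] from rfl, pvOcc_nil]
    simp
  have hA : ("" : String) ∉ (PySem.List.sorted (pvDDA data "") (fun p => (-p.2 : Int)) false).map
      (fun p => p.1) := by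
    intro hmem'
    obtain ⟨p, hp, hp1⟩ := List.mem_map.mp hmem'
    rw [PySem.List.mem_sorted] at hp
    unfold pvDDA at hp
    obtain ⟨e, he, rfl⟩ := List.mem_map.mp hp
    simp only at hp1
    subst hp1
    have hfa : pvFA "" "" = true :=
      (List.mem_filter.mp ((PySem.Set.mem_ofList _ _).mp he)).2
    rw [pvFA_nil] at hfa
    simp at hfa
  exact hA (by rw [heq]; exact hB)

-- ===== VERDICT (by name: the statement is the Claim_ definition above) =====
theorem search_function_spec : Claim_unchanged_search_function := by
  intro data query _ hnd
  unfold D_search_function at hnd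
  exact pvMain data query hnd

theorem search_function_changed : Claim_changed_search_function := by
  unfold Claim_changed_search_function; decide

theorem search_function_tight : Claim_exact_search_function := by
  intro data query _ hd
  unfold D_search_function at hd
  exact pvTight data query hd.1 hd.2
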